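-- pv_equiv track=rewrite | github.com/czjun/Transformer-Summarizer | src/summarizer_app/fallback.py | _fit_target_length
-- ===== SOURCE A (Python) =====
-- from typing import List
--
-- def _fit_target_length(selected, target_length: int) -> tuple[str, List[str]]:
--     kept: List[str] = []
--     total = 0
--     for _, _, sentence in selected:
--         next_len = total + len(sentence)
--         if kept and next_len > target_length:
--             break
--         kept.append(sentence)
--         total = next_len
--     if not kept:
--         kept = [selected[0][2]]
--     return "".join(kept), kept
-- ===== SOURCE B (Python) =====
-- from typing import List
--
-- def _fit_target_length(selected, target_length: int) -> tuple[str, List[str]]: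
--     # Prefix-sum decomposition: count how many cumulative lengths fit, always keep >= 1.
--     prefix = []
--     acc = 0
--     for _, _, sentence in selected:
--         acc += len(sentence)
--         prefix.append(acc)
--     k = max(1, sum(1 for p in prefix if p <= target_length))
--     kept = [t[2] for t in selected[:k]]
--     return "".join(kept), kept
-- ===== Notes on version B (the rewrite author's own statement) =====
-- stated objective: alternative
-- what changed: Replaces A's scan-with-early-break and running total by a prefix-sum table, a count of the cumulative lengths that fit (clamped to at least 1), and a single slice of the first k sentences.
import Mathlib
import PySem

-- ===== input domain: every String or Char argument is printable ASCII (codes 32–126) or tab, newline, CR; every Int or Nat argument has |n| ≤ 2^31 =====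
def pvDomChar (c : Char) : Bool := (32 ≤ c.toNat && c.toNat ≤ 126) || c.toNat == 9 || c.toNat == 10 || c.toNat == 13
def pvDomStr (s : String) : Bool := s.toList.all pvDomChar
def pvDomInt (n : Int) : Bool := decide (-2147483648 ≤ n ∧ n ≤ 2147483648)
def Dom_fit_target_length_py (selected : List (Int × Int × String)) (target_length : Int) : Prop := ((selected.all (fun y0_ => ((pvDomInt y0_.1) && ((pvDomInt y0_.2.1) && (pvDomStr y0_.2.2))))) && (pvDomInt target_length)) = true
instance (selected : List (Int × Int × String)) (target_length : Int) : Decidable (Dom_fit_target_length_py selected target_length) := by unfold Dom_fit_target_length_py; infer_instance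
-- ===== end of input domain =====

-- B replaces A's scan-with-early-break by a prefix-sum table, a count of the sums that fit
-- and a single slice (objective: alternative decomposition, same cost).

-- ===== PORT A =====
-- the for-loop with break: state = (kept, total)
def fitLoopA (target : Int) : List (Int × Int × String) → List String → Int → List String
  | [], kept, _ => kept
  | (_, _, sentence) :: rest, kept, total =>
    let next_len := total + PySem.Str.len sentence
    if kept ≠ [] ∧ next_len > target then kept
    else fitLoopA target rest (kept ++ [sentence]) next_len

def fit_target_length_py (selected : List (Int × Int × String)) (target_length : Int) : String × List String :=
  let kept := fitLoopA target_length selected [] 0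
  let kept :=
    if kept = [] then
      match PySem.List.pyGet? selected 0 with
      | some t => [t.2.2]
      | none => []    -- Python raises IndexError here (empty selected); excluded by Pre_
    else kept
  (PySem.Str.join "" kept, kept)

-- ===== PORT B =====
-- the prefix-sum loop of Source B
def fitPrefixB : List (Int × Int × String) → Int → List Int
  | [], _ => []
  | (_, _, sentence) :: rest, acc =>
    let acc := acc + PySem.Str.len sentence
    acc :: fitPrefixB rest acc

def fit_target_length_py_alt (selected : List (Int × Int × String)) (target_length : Int) : String × List String :=
  let prefs := fitPrefixB selected 0
  let k : Int := max 1 ((prefs.countP (fun p => decide (p ≤ target_length)) : Nat) : Int)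
  let kept := (PySem.List.slice selected none (some k)).map (fun t => t.2.2)
  (PySem.Str.join "" kept, kept)

-- ===== PRECONDITION & SPEC =====
-- Pre_ excludes exactly the empty list, on which Python A raises IndexError (selected[0]).
def Pre_fit_target_length_py (selected : List (Int × Int × String)) (target_length : Int) : Prop := selected ≠ []
instance (selected : List (Int × Int × String)) (target_length : Int) : Decidable (Pre_fit_target_length_py selected target_length) := by unfold Pre_fit_target_length_py; infer_instance
def pvWitness_fit_target_length_py : (List (Int × Int × String)) × Int := ([(0, 0, "ab")], 5)

def Spec_fit_target_length_py (selected : List (Int × Int × String)) (target_length : Int) (out : String × List String) : Prop := out = fit_target_length_py_alt selected target_length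
instance (selected : List (Int × Int × String)) (target_length : Int) (out : String × List String) : Decidable (Spec_fit_target_length_py selected target_length out) := by unfold Spec_fit_target_length_py; infer_instance

-- ===== CLAIM (what is proved, stated in full; the proofs are below) =====
def Claim_equal_fit_target_length_py : Prop := ∀ (selected : List (Int × Int × String)) (target_length : Int), Dom_fit_target_length_py selected target_length → Pre_fit_target_length_py selected target_length → Spec_fit_target_length_py selected target_length (fit_target_length_py selected target_length)
-- ===== LEMMAS AND PROOFS =====

lemma strLen_nonneg (s : String) : 0 ≤ PySem.Str.len s := by
  rw [PySem.Str.len_eq]; exact Int.natCast_nonneg _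

-- once the running total exceeds the target, no later prefix sum fits
lemma cnt_zero (tl : Int) : ∀ (sel : List (Int × Int × String)) (total : Int), tl < total →
    (fitPrefixB sel total).countP (fun p => decide (p ≤ tl)) = 0 := by
  intro sel
  induction sel with
  | nil => intro total _; simp [fitPrefixB]
  | cons x rest ih =>
    intro total h
    obtain ⟨a, b, s⟩ := x
    have hl := strLen_nonneg s
    simp only [fitPrefixB, List.countP_cons]
    rw [ih (total + PySem.Str.len s) (by omega)]
    rw [if_neg (by simp only [decide_eq_true_eq]; omega)]

-- characterization of A's loop once kept is nonempty
lemma loop_eq (tl : Int) : ∀ (sel : List (Int × Int × String)) (kept : List String) (total : Int), kept ≠ [] →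
    fitLoopA tl sel kept total =
      kept ++ (sel.take ((fitPrefixB sel total).countP (fun p => decide (p ≤ tl)))).map (fun t => t.2.2) := by
  intro sel
  induction sel with
  | nil => intro kept total _; simp [fitLoopA, fitPrefixB]
  | cons x rest ih =>
    intro kept total hk
    obtain ⟨a, b, s⟩ := x
    have hl := strLen_nonneg s
    simp only [fitLoopA, fitPrefixB, List.countP_cons]
    by_cases hgt : tl < total + PySem.Str.len s
    · rw [if_pos ⟨hk, hgt⟩]
      rw [cnt_zero tl rest (total + PySem.Str.len s) hgt]
      rw [if_neg (by simp only [decide_eq_true_eq]; omega)]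
      simp
    · rw [if_neg (fun hc => hgt hc.2)]
      rw [ih (kept ++ [s]) (total + PySem.Str.len s) (by simp)]
      rw [if_pos (by simp only [decide_eq_true_eq]; omega)]
      simp [List.take_succ_cons]

theorem fit_target_length_py_spec : Claim_equal_fit_target_length_py := by
  intro selected tl _ hpre
  unfold Spec_fit_target_length_py fit_target_length_py fit_target_length_py_alt
  cases selected with
  | nil => exact absurd rfl hpre
  | cons x rest =>
    obtain ⟨a, b, s⟩ := x
    have hl := strLen_nonneg s
    have hA : fitLoopA tl ((a, b, s) :: rest) [] 0 =
        [s] ++ (rest.take ((fitPrefixB rest (0 + PySem.Str.len s)).countP (fun p => decide (p ≤ tl)))).map (fun t => t.2.2) := by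
      have h1 : fitLoopA tl ((a, b, s) :: rest) [] 0 = fitLoopA tl rest ([] ++ [s]) (0 + PySem.Str.len s) := by
        simp only [fitLoopA]
        rw [if_neg (by simp)]
      rw [h1, loop_eq tl rest ([] ++ [s]) (0 + PySem.Str.len s) (by simp)]
      rfl
    simp only [fitPrefixB, List.countP_cons, hA]
    rw [if_neg (by simp)]
    generalize hc : (fitPrefixB rest (0 + PySem.Str.len s)).countP (fun p => decide (p ≤ tl)) = c
    by_cases hle : 0 + PySem.Str.len s ≤ tl
    · rw [if_pos (by simp only [decide_eq_true_eq]; omega)]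
      rw [max_eq_right (show (1 : Int) ≤ ((c + 1 : Nat) : Int) by exact_mod_cast Nat.succ_le_succ (Nat.zero_le c))]
      rw [PySem.List.slice_to_natCast]
      simp [List.take_succ_cons]
    · rw [if_neg (by simp only [decide_eq_true_eq]; omega)]
      have hc0 : c = 0 := by
        rw [← hc]; exact cnt_zero tl rest (0 + PySem.Str.len s) (by omega)
      rw [hc0]
      rw [max_eq_left (by simp)]
      rw [show (1 : Int) = ((1 : Nat) : Int) from rfl, PySem.List.slice_to_natCast]
      simp
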